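-- pv_equiv track=rewrite | github.com/kelvinhuang0327/number-pattern-research | tools/verify_biglotto_3bet_comparison.py | tail_balance_bet_biglotto
-- ===== SOURCE A (Python) =====
-- from collections import Counter
--
-- def tail_balance_bet_biglotto(history, window=100, exclude=None):
--     """Tail Balance for Big Lotto (1-49)"""
--     if exclude is None:
--         exclude = set()
--     recent = history[-window:] if len(history) >= window else history
--     all_nums = [n for d in recent for n in d['numbers']]
--     freq = Counter(all_nums)
--
--     tail_groups = {i: [] for i in range(10)}
--     for n in range(1, 50):
--         if n not in exclude:
--             tail = n % 10
--             tail_groups[tail].append((n, freq.get(n, 0)))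
--
--     for tail in tail_groups:
--         tail_groups[tail].sort(key=lambda x: x[1], reverse=True)
--
--     selected = []
--     available_tails = [t for t in range(10) if tail_groups[t]]
--     available_tails.sort(key=lambda t: tail_groups[t][0][1] if tail_groups[t] else 0, reverse=True)
--
--     idx_in_group = {t: 0 for t in range(10)}
--     round_num = 0
--
--     while len(selected) < 6:
--         for tail in available_tails:
--             if len(selected) >= 6:
--                 break
--             group = tail_groups[tail]
--             idx = idx_in_group[tail]
--             if idx < len(group):
--                 num, _ = group[idx]
--                 if num not in selected:
--                     selected.append(num)
--                     idx_in_group[tail] += 1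
--         round_num += 1
--         if round_num > 10:
--             break
--
--     if len(selected) < 6:
--         remaining = [n for n in range(1, 50) if n not in selected and n not in exclude]
--         remaining.sort(key=lambda x: freq.get(x, 0), reverse=True)
--         selected.extend(remaining[:6 - len(selected)])
--
--     return sorted(selected[:6])
-- ===== SOURCE B (Python) =====
-- from collections import Counter
--
-- def tail_balance_bet_biglotto(history, window=100, exclude=None):
--     """Rank-by-counting: no per-tail candidate lists and no round-robin loop —
--     each candidate gets a composite priority computed by counting, then one sort."""
--     if exclude is None:
--         exclude = set()
--     recent = history[-window:] if len(history) >= window else history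
--     freq = Counter(n for d in recent for n in d['numbers'])
--
--     cand = [n for n in range(1, 50) if n not in exclude]
--     tails = {n % 10 for n in cand}
--     # top frequency reached inside each tail class
--     top = {t: max(freq[n] for n in cand if n % 10 == t) for t in tails}
--     # priority of a tail class = how many classes are served before it
--     trank = {t: sum(1 for u in tails if (top[u], -u) > (top[t], -t)) for t in tails}
--     # priority of a number inside its class = how many classmates are served before it
--     rank = {n: sum(1 for m in cand if m % 10 == n % 10
--                    and (freq[m], -m) > (freq[n], -n)) for n in cand}
--     return sorted(sorted(cand, key=lambda n: rank[n] * 10 + trank[n % 10])[:6])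
-- ===== Notes on version B (the rewrite author's own statement) =====
-- stated objective: alternative
-- what changed: A's per-tail grouping, per-group sorts and stateful round-robin while-loop (idx_in_group/round_num) are replaced by rank-by-counting: each candidate's priority (how many classmates precede it, and how many tail classes are served first) is computed by direct counting, every per-tail list and the selection loop disappear, and one sort on the composite key rank*10+tail_rank picks the first 6.
import Mathlib
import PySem

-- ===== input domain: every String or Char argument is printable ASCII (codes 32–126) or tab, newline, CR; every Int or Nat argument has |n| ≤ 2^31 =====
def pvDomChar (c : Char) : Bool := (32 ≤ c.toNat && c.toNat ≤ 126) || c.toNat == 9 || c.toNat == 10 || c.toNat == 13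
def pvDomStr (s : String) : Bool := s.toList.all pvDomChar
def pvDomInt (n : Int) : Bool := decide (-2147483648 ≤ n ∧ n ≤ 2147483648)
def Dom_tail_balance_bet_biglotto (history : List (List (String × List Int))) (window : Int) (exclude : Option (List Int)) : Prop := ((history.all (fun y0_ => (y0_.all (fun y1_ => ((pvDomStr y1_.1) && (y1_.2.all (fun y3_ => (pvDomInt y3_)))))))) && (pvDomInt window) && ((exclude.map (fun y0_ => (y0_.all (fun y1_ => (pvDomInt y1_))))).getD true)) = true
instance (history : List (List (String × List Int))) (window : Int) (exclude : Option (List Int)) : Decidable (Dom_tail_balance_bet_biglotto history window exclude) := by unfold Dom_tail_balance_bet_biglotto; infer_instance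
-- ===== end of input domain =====

-- B replaces A's per-tail grouping, per-group sorts and stateful round-robin while-loop by
-- rank-by-counting composite priorities and one sort (objective: alternative; same return value, proved below).


-- ===== PORT A =====
-- inner `for tail in available_tails:` loop of A's while (early break at 6 via the guard)
def pvInnerA (tg : PySem.Dict Int (List (Int × Int))) : List Int → List Int → PySem.Dict Int Int → List Int × PySem.Dict Int Int
  | [], sel, idx => (sel, idx)
  | t :: ts, sel, idx =>
    if 6 ≤ sel.length then (sel, idx)
    else
      let group := tg.getD t []
      let i := idx.getD t 0
      if i < PySem.List.len group then
        let num := (PySem.List.pyGetD group i (0, 0)).1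
        if num ∈ sel then pvInnerA tg ts sel idx
        else pvInnerA tg ts (sel ++ [num]) (idx.insert t (i + 1))
      else pvInnerA tg ts sel idx

-- A's `while len(selected) < 6:` loop; round_num increments each pass and breaks past 10,
-- so 12 units of fuel are never exhausted (fuel 0 is unreachable).
def pvWhileA (tg : PySem.Dict Int (List (Int × Int))) (tails : List Int) : Nat → List Int → PySem.Dict Int Int → Int → List Int
  | 0, sel, _, _ => sel
  | fuel + 1, sel, idx, round =>
    if sel.length < 6 then
      let r := pvInnerA tg tails sel idx
      let round' := round + 1
      if 10 < round' then r.1 else pvWhileA tg tails fuel r.1 r.2 round'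
    else sel

-- everything in A after `freq = Counter(all_nums)`
-- tail_groups = {i: [] for i in range(10)}
def pvTg0A : PySem.Dict Int (List (Int × Int)) :=
  (PySem.List.pyRange 0 10 1).foldl (fun d i => d.insert i []) PySem.Dict.empty
-- the bucket-filling `for n in range(1, 50):` loop
def pvTg1A (ex : List Int) (freq : PySem.Dict Int Int) : PySem.Dict Int (List (Int × Int)) :=
  (PySem.List.pyRange 1 50 1).foldl (fun d n =>
    if !ex.contains n then d.modify (PySem.Int.mod n 10) [] (fun g => g ++ [(n, freq.getD n 0)]) else d) pvTg0A
-- the `for tail in tail_groups:` in-place sorting loop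
def pvTgA (ex : List Int) (freq : PySem.Dict Int Int) : PySem.Dict Int (List (Int × Int)) :=
  (pvTg1A ex freq).keys.foldl (fun d t => d.modify t [] (fun g => PySem.List.sorted g (fun p => p.2) true)) (pvTg1A ex freq)
-- idx_in_group = {t: 0 for t in range(10)}
def pvIdx0A : PySem.Dict Int Int :=
  (PySem.List.pyRange 0 10 1).foldl (fun d t => d.insert t 0) PySem.Dict.empty

def pvSelectA (ex : List Int) (freq : PySem.Dict Int Int) : List Int :=
  let tg := pvTgA ex freq
  let available0 := (PySem.List.pyRange 0 10 1).filter (fun t => !(tg.getD t []).isEmpty)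
  let available_tails := PySem.List.sorted available0
    (fun t => match tg.getD t [] with | [] => (0 : Int) | p :: _ => p.2) true
  let selected := pvWhileA tg available_tails 12 [] pvIdx0A 0
  let selected2 :=
    if selected.length < 6 then
      let remaining := (PySem.List.pyRange 1 50 1).filter (fun n => !selected.contains n && !ex.contains n)
      let remaining2 := PySem.List.sorted remaining (fun n => freq.getD n 0) true
      selected ++ PySem.List.slice remaining2 none (some (6 - PySem.List.len selected))
    else selected
  PySem.List.sorted (PySem.List.slice selected2 none (some 6)) (fun n => n) false

def tail_balance_bet_biglotto (history : List (List (String × List Int))) (window : Int) (exclude : Option (List Int)) : List Int :=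
  let ex : List Int := exclude.getD []
  let recent := if window ≤ PySem.List.len history then PySem.List.slice history (some (-window)) none else history
  let all_nums := recent.flatMap (fun d => ((d.find? (fun p => p.1 == "numbers")).map (fun p => p.2)).getD [])
  pvSelectA ex (PySem.Dict.counter all_nums)

-- ===== PORT B =====
-- cand = [n for n in range(1, 50) if n not in exclude]
def pvCandB (ex : List Int) : List Int :=
  (PySem.List.pyRange 1 50 1).filter (fun n => !ex.contains n)
-- tails = {n % 10 for n in cand}
def pvTailsB (ex : List Int) : PySem.Set Int :=
  PySem.Set.ofList ((pvCandB ex).map (fun n => PySem.Int.mod n 10))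
-- (freq[m], -m) > (freq[n], -n) — Python's tuple comparison, written out
def pvBeats (freq : PySem.Dict Int Int) (m n : Int) : Bool :=
  (freq.getD n 0 < freq.getD m 0) || (freq.getD m 0 == freq.getD n 0 && -n < -m)
-- top = {t: max(freq[n] for n in cand if n % 10 == t) for t in tails}; for every t in tails
-- the generator is nonempty, so Python's max never raises and the getD 0 arm is unreachable
def pvTopB (ex : List Int) (freq : PySem.Dict Int Int) : PySem.Dict Int Int :=
  (pvTailsB ex).foldl (fun d t =>
    d.insert t ((PySem.List.max?
      (((pvCandB ex).filter (fun n => PySem.Int.mod n 10 == t)).map (fun n => freq.getD n 0))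
      (fun x => x)).getD 0)) PySem.Dict.empty
-- trank = {t: sum(1 for u in tails if (top[u], -u) > (top[t], -t)) for t in tails}
def pvTrankB (ex : List Int) (freq : PySem.Dict Int Int) : PySem.Dict Int Int :=
  let top := pvTopB ex freq
  (pvTailsB ex).foldl (fun d t =>
    d.insert t (((pvTailsB ex).countP (fun u =>
      (top.getD t 0 < top.getD u 0) ||
      (top.getD u 0 == top.getD t 0 && -t < -u)) : Int))) PySem.Dict.empty
-- rank = {n: sum(1 for m in cand if m % 10 == n % 10 and (freq[m], -m) > (freq[n], -n)) for n in cand}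
def pvRankB (ex : List Int) (freq : PySem.Dict Int Int) : PySem.Dict Int Int :=
  (pvCandB ex).foldl (fun d n =>
    d.insert n (((pvCandB ex).countP (fun m =>
      (PySem.Int.mod m 10 == PySem.Int.mod n 10) && pvBeats freq m n) : Int))) PySem.Dict.empty
-- return sorted(sorted(cand, key=lambda n: rank[n] * 10 + trank[n % 10])[:6])
def pvSelectB (ex : List Int) (freq : PySem.Dict Int Int) : List Int :=
  let rank := pvRankB ex freq
  let trank := pvTrankB ex freq
  PySem.List.sorted
    (PySem.List.slice
      (PySem.List.sorted (pvCandB ex)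
        (fun n => rank.getD n 0 * 10 + trank.getD (PySem.Int.mod n 10) 0) false)
      none (some 6))
    (fun n => n) false

def tail_balance_bet_biglotto_alt (history : List (List (String × List Int))) (window : Int) (exclude : Option (List Int)) : List Int :=
  let ex : List Int := exclude.getD []
  let recent := if window ≤ PySem.List.len history then PySem.List.slice history (some (-window)) none else history
  let all_nums := recent.flatMap (fun d => ((d.find? (fun p => p.1 == "numbers")).map (fun p => p.2)).getD [])
  pvSelectB ex (PySem.Dict.counter all_nums)

-- ===== PRECONDITION & SPEC =====
-- Pre_ excludes exactly the inputs where some draw inside the examined window has no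
-- 'numbers' key, on which Python A (and B) raise KeyError.
def Pre_tail_balance_bet_biglotto (history : List (List (String × List Int))) (window : Int) (exclude : Option (List Int)) : Prop :=
  ∀ d ∈ (if window ≤ PySem.List.len history then PySem.List.slice history (some (-window)) none else history),
    ((d.find? (fun p => p.1 == "numbers")).isSome) = true
instance (history : List (List (String × List Int))) (window : Int) (exclude : Option (List Int)) : Decidable (Pre_tail_balance_bet_biglotto history window exclude) := by unfold Pre_tail_balance_bet_biglotto; infer_instance

def pvWitness_tail_balance_bet_biglotto : (List (List (String × List Int))) × Int × Option (List Int) :=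
  ([[("numbers", [1, 2, 3, 11, 21])]], 100, none)

def Spec_tail_balance_bet_biglotto (history : List (List (String × List Int))) (window : Int) (exclude : Option (List Int)) (out : List Int) : Prop := out = tail_balance_bet_biglotto_alt history window exclude
instance (history : List (List (String × List Int))) (window : Int) (exclude : Option (List Int)) (out : List Int) : Decidable (Spec_tail_balance_bet_biglotto history window exclude out) := by unfold Spec_tail_balance_bet_biglotto; infer_instance

-- ===== CLAIM (what is proved, stated in full; the proofs are below) =====
def Claim_equal_tail_balance_bet_biglotto : Prop := ∀ (history : List (List (String × List Int))) (window : Int) (exclude : Option (List Int)), Dom_tail_balance_bet_biglotto history window exclude → Pre_tail_balance_bet_biglotto history window exclude → Spec_tail_balance_bet_biglotto history window exclude (tail_balance_bet_biglotto history window exclude)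

-- ===== LEMMAS AND PROOFS =====

-- B's per-tail candidate group: tail-t numbers of 1..49 not excluded, frequency-descending
def pvCand (ex : List Int) (t : Int) : List Int :=
  (PySem.List.pyRange (if t = 0 then 10 else t) 50 10).filter (fun n => !ex.contains n)
def pvG (ex : List Int) (freq : PySem.Dict Int Int) (t : Int) : List Int :=
  PySem.List.sorted (pvCand ex t) (fun n => -(freq.getD n 0)) false

-- row r of the round-robin over groups Gl, visited in tail order ts
def pvRowG (Gl : Int → List Int) (ts : List Int) (r : Int) : List Int :=
  (ts.filter (fun t => r < PySem.List.len (Gl t))).map (fun t => PySem.List.pyGetD (Gl t) r 0)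
-- rows r, r+1, …, rounds-1 flattened
def pvOrdFrom (Gl : Int → List Int) (ts : List Int) (r rounds : Int) : List Int :=
  (PySem.List.pyRange r rounds 1).flatMap (pvRowG Gl ts)

-- canonical (dict-free) forms shared by the two proofs
def pvAvail (ex : List Int) (freq : PySem.Dict Int Int) : List Int :=
  (PySem.List.pyRange 0 10 1).filter (fun t => !(pvG ex freq t).isEmpty)
def pvTails (ex : List Int) (freq : PySem.Dict Int Int) : List Int :=
  PySem.List.sorted (pvAvail ex freq)
    (fun t => -(freq.getD (PySem.List.pyGetD (pvG ex freq t) 0 0) 0)) false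
def pvRounds (ex : List Int) (freq : PySem.Dict Int Int) : Int :=
  PySem.List.maxD ((pvTails ex freq).map (fun t => PySem.List.len (pvG ex freq t))) (fun x => x) 0
def pvOrder (ex : List Int) (freq : PySem.Dict Int Int) : List Int :=
  pvOrdFrom (pvG ex freq) (pvTails ex freq) 0 (pvRounds ex freq)


-- insertBy only compares against members: congruence
theorem pv_insertBy_congr {α : Type} (cmp cmp' : α → α → Bool) (x : α) :
    ∀ ys : List α, (∀ y ∈ ys, cmp x y = cmp' x y) →
      PySem.List.insertBy cmp x ys = PySem.List.insertBy cmp' x ys := by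
  intro ys
  induction ys with
  | nil => intro _; rfl
  | cons y ys ih =>
    intro h
    simp only [PySem.List.insertBy]
    rw [h y (by simp)]
    by_cases hc : cmp' x y = true
    · simp [hc]
    · simp [hc, ih (fun z hz => h z (by simp [hz]))]

theorem pv_foldl_insertBy_congr {α : Type} (cmp cmp' : α → α → Bool) :
    ∀ (xs acc : List α),
      (∀ a ∈ xs, ∀ b, (b ∈ xs ∨ b ∈ acc) → cmp a b = cmp' a b) →
      xs.foldl (fun acc x => PySem.List.insertBy cmp x acc) acc
        = xs.foldl (fun acc x => PySem.List.insertBy cmp' x acc) acc := by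
  intro xs
  induction xs with
  | nil => intro acc _; rfl
  | cons x xs ih =>
    intro acc h
    simp only [List.foldl_cons]
    rw [pv_insertBy_congr cmp cmp' x acc (fun y hy => h x (by simp) y (Or.inr hy))]
    apply ih
    intro a ha b hb
    apply h a (by simp [ha])
    rcases hb with hb | hb
    · exact Or.inl (by simp [hb])
    · rcases (PySem.List.mem_insertBy _ _ _ _).1 hb with hb | hb
      · exact Or.inl (by simp [hb])
      · exact Or.inr hb

-- reverse=True by key k  =  reverse=False by a member-wise negated key
theorem pv_sorted_rev_eq_sorted_of {α : Type} (xs : List α) (k k' : α → Int)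
    (h : ∀ a ∈ xs, k' a = -(k a)) :
    PySem.List.sorted xs k true = PySem.List.sorted xs k' false := by
  rw [PySem.List.sorted_rev_eq_foldl_insertBy, PySem.List.sorted_eq_foldl_insertBy]
  apply pv_foldl_insertBy_congr
  intro a ha b hb
  rcases hb with hb | hb
  · simp [h a ha, h b hb]
  · simp at hb

-- map commutes with insertBy when the comparison does
theorem pv_insertBy_map {α β : Type} (g : α → β) (cmpb : β → β → Bool) (cmpa : α → α → Bool)
    (h : ∀ a b, cmpb (g a) (g b) = cmpa a b) (x : α) :
    ∀ ys : List α, PySem.List.insertBy cmpb (g x) (ys.map g)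
      = (PySem.List.insertBy cmpa x ys).map g := by
  intro ys
  induction ys with
  | nil => rfl
  | cons y ys ih =>
    simp only [List.map_cons, PySem.List.insertBy, h]
    by_cases hc : cmpa x y = true
    · simp [hc]
    · simp [hc, ih]

theorem pv_foldl_insertBy_map {α β : Type} (g : α → β) (cmpb : β → β → Bool) (cmpa : α → α → Bool)
    (h : ∀ a b, cmpb (g a) (g b) = cmpa a b) :
    ∀ (xs acc : List α),
      (xs.map g).foldl (fun acc y => PySem.List.insertBy cmpb y acc) (acc.map g)
        = (xs.foldl (fun acc x => PySem.List.insertBy cmpa x acc) acc).map g := by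
  intro xs
  induction xs with
  | nil => intro acc; rfl
  | cons x xs ih =>
    intro acc
    simp only [List.map_cons, List.foldl_cons]
    rw [pv_insertBy_map g cmpb cmpa h x acc, ih]

-- sort pairs (n, f n) by second component descending = sort numbers by -f ascending, then pair up
theorem pv_sorted_map_pair (fr : Int → Int) (ns : List Int) :
    PySem.List.sorted (ns.map (fun n => (n, fr n))) (fun p => p.2) true
      = (PySem.List.sorted ns (fun n => -(fr n)) false).map (fun n => (n, fr n)) := by
  rw [PySem.List.sorted_rev_eq_foldl_insertBy, PySem.List.sorted_eq_foldl_insertBy]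
  have := pv_foldl_insertBy_map (fun n : Int => (n, fr n))
    (fun p q : Int × Int => decide (q.2 < p.2))
    (fun a b : Int => decide (-(fr a) < -(fr b)))
    (by intro a b; simp) ns []
  simpa using this

-- getD after a fold of inserts over a Nodup key list
theorem pv_getD_foldl_insert {ν : Type} (v : Int → ν) :
    ∀ (K : List Int), K.Nodup → ∀ (d : PySem.Dict Int ν) (t : Int) (dflt : ν),
      ((K.foldl (fun d k => d.insert k (v k)) d).getD t dflt)
        = if t ∈ K then v t else d.getD t dflt := by
  intro K
  induction K with
  | nil => intro _ d t dflt; simp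
  | cons k K ih =>
    intro hnd d t dflt
    simp only [List.foldl_cons]
    rw [ih (by simp_all) _ t dflt]
    by_cases ht : t ∈ K
    · simp [ht]
    · rw [PySem.Dict.getD_insert]
      by_cases htk : t = k <;> simp [ht, htk]

-- getD after A's bucket-building fold (append (n, f n) to bucket n % 10 when p n)
theorem pv_getD_foldl_modify_append (p : Int → Bool) (fr : Int → Int) :
    ∀ (L : List Int) (d : PySem.Dict Int (List (Int × Int))) (t : Int),
      ((L.foldl (fun d n =>
          if p n then d.modify (PySem.Int.mod n 10) [] (fun g => g ++ [(n, fr n)]) else d) d).getD t [])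
        = d.getD t [] ++ (L.filter (fun n => p n && (PySem.Int.mod n 10 == t))).map (fun n => (n, fr n)) := by
  intro L
  induction L with
  | nil => intro d t; simp
  | cons n L ih =>
    intro d t
    simp only [List.foldl_cons, List.filter_cons]
    by_cases hp : p n = true
    · rw [if_pos hp, ih, PySem.Dict.getD_modify]
      by_cases hm' : t = PySem.Int.mod n 10
      · have hm : (p n && (PySem.Int.mod n 10 == t)) = true := by
          simp only [hp, Bool.true_and, beq_iff_eq]; exact hm'.symm
        rw [if_pos hm', hm, if_pos rfl, List.map_cons, hm', List.append_assoc]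
        rfl
      · have hmb : (PySem.Int.mod n 10 == t) = false := by
          simp only [beq_eq_false_iff_ne, ne_eq]
          exact fun h => hm' h.symm
        rw [if_neg hm', hmb, Bool.and_false, if_neg (by simp)]
    · simp only [Bool.not_eq_true] at hp
      rw [if_neg (by simp [hp]), ih, hp, Bool.false_and, if_neg (by simp)]

-- getD after A's in-place sorting pass over a Nodup key list
theorem pv_getD_foldl_modify_sort :
    ∀ (K : List Int), K.Nodup → ∀ (d : PySem.Dict Int (List (Int × Int))) (t : Int),
      ((K.foldl (fun d t => d.modify t [] (fun g => PySem.List.sorted g (fun p => p.2) true)) d).getD t [])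
        = if t ∈ K then PySem.List.sorted (d.getD t []) (fun p => p.2) true else d.getD t [] := by
  intro K
  induction K with
  | nil => intro _ d t; simp
  | cons k K ih =>
    intro hnd d t
    simp only [List.foldl_cons]
    rw [ih (by simp_all) _ t]
    by_cases ht : t ∈ K
    · have htk : t ≠ k := by rintro rfl; simp_all
      simp [ht, PySem.Dict.getD_modify, htk]
    · rw [PySem.Dict.getD_modify]
      by_cases htk : t = k <;> simp [ht, htk]

theorem pv_range_filter_mod (t : Int) (h0 : 0 ≤ t) (h1 : t < 10) :
    (PySem.List.pyRange 1 50 1).filter (fun n => PySem.Int.mod n 10 == t)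
      = PySem.List.pyRange (if t = 0 then 10 else t) 50 10 := by
  interval_cases t <;> decide

theorem pv_nodup_range10 (t : Int) (h0 : 0 ≤ t) (h1 : t < 10) :
    (PySem.List.pyRange (if t = 0 then 10 else t) 50 10).Nodup := by
  interval_cases t <;> decide

theorem pv_len_range10 (t : Int) (h0 : 0 ≤ t) (h1 : t < 10) :
    (PySem.List.pyRange (if t = 0 then 10 else t) 50 10).length ≤ 5 := by
  interval_cases t <;> decide

theorem pv_mem_cand {ex : List Int} {t n : Int} (h0 : 0 ≤ t) (h1 : t < 10)
    (hn : n ∈ pvCand ex t) : 1 ≤ n ∧ n < 50 ∧ n % 10 = t ∧ ex.contains n = false := by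
  unfold pvCand at hn
  rw [List.mem_filter] at hn
  obtain ⟨hr, hex⟩ := hn
  rw [PySem.List.mem_pyRange_iff_of_pos (by norm_num)] at hr
  obtain ⟨hlo, hhi, k, hk⟩ := hr
  refine ⟨?_, hhi, ?_, by simpa using hex⟩
  · by_cases ht : t = 0 <;> simp [ht] at hlo <;> omega
  · by_cases ht : t = 0 <;> simp [ht] at hlo hk ⊢ <;> omega

theorem pv_mem_cand_of {ex : List Int} {n : Int} (h1 : 1 ≤ n) (h2 : n < 50)
    (hex : ex.contains n = false) : n ∈ pvCand ex (n % 10) := by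
  unfold pvCand
  rw [List.mem_filter]
  constructor
  · rw [PySem.List.mem_pyRange_iff_of_pos (by norm_num)]
    by_cases ht : n % 10 = 0
    · rw [if_pos ht]
      refine ⟨by omega, h2, ?_⟩
      omega
    · rw [if_neg ht]
      refine ⟨by omega, h2, ?_⟩
      omega
  · simpa using hex

theorem pv_mem_pvG {ex : List Int} {freq : PySem.Dict Int Int} {t n : Int} :
    n ∈ pvG ex freq t ↔ n ∈ pvCand ex t := by
  unfold pvG; exact PySem.List.mem_sorted _ _ _ n

theorem pv_nodup_pvG (ex : List Int) (freq : PySem.Dict Int Int) (t : Int)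
    (h0 : 0 ≤ t) (h1 : t < 10) : (pvG ex freq t).Nodup := by
  unfold pvG pvCand
  exact ((PySem.List.sorted_perm _ _ _).nodup_iff).mpr
    (List.Nodup.filter _ (pv_nodup_range10 t h0 h1))

theorem pv_len_pvG (ex : List Int) (freq : PySem.Dict Int Int) (t : Int)
    (h0 : 0 ≤ t) (h1 : t < 10) : (pvG ex freq t).length ≤ 5 := by
  unfold pvG pvCand
  rw [PySem.List.length_sorted]
  exact le_trans (List.length_filter_le _ _) (pv_len_range10 t h0 h1)

theorem pv_disj_pvG {ex : List Int} {freq : PySem.Dict Int Int} {t t' n : Int}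
    (h0 : 0 ≤ t) (h1 : t < 10) (h0' : 0 ≤ t') (h1' : t' < 10) (hne : t ≠ t')
    (hn : n ∈ pvG ex freq t) : n ∉ pvG ex freq t' := by
  intro hn'
  have a := pv_mem_cand h0 h1 (pv_mem_pvG.1 hn)
  have b := pv_mem_cand h0' h1' (pv_mem_pvG.1 hn')
  omega

theorem pv_innerA_cons (tg : PySem.Dict Int (List (Int × Int))) (t : Int) (ts : List Int)
    (sel : List Int) (idx : PySem.Dict Int Int) :
    pvInnerA tg (t :: ts) sel idx =
      if 6 ≤ sel.length then (sel, idx)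
      else if (idx.getD t 0) < PySem.List.len (tg.getD t []) then
        (if (PySem.List.pyGetD (tg.getD t []) (idx.getD t 0) (0, 0)).1 ∈ sel
         then pvInnerA tg ts sel idx
         else pvInnerA tg ts (sel ++ [(PySem.List.pyGetD (tg.getD t []) (idx.getD t 0) (0, 0)).1])
                (idx.insert t (idx.getD t 0 + 1)))
      else pvInnerA tg ts sel idx := rfl

theorem pv_innerA_spec (tg : PySem.Dict Int (List (Int × Int))) (Gl : Int → List Int) (fr : Int → Int) :
    ∀ (ts : List Int) (sel : List Int) (idx : PySem.Dict Int Int) (r : Nat),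
      ts.Nodup →
      (∀ t ∈ ts, tg.getD t [] = (Gl t).map (fun n => (n, fr n))) →
      (∀ t ∈ ts, ∀ t' ∈ ts, t ≠ t' → ∀ n ∈ Gl t, n ∉ Gl t') →
      (∀ t ∈ ts, (Gl t).Nodup) →
      (∀ t ∈ ts, idx.getD t 0 = ((min r (Gl t).length : Nat) : Int)) →
      (∀ t ∈ ts, ∀ i : Nat, r ≤ i → ∀ hi : i < (Gl t).length, (Gl t)[i] ∉ sel) →
      sel.length ≤ 6 →
      (pvInnerA tg ts sel idx).1 = (sel ++ pvRowG Gl ts r).take 6 ∧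
      ((pvInnerA tg ts sel idx).1.length < 6 →
        (pvInnerA tg ts sel idx).1 = sel ++ pvRowG Gl ts r ∧
        (∀ t ∈ ts, (pvInnerA tg ts sel idx).2.getD t 0 = ((min (r+1) (Gl t).length : Nat) : Int)) ∧
        (∀ t : Int, t ∉ ts → (pvInnerA tg ts sel idx).2.getD t 0 = idx.getD t 0) ∧
        (∀ t ∈ ts, ∀ i : Nat, r+1 ≤ i → ∀ hi : i < (Gl t).length, (Gl t)[i] ∉ (pvInnerA tg ts sel idx).1)) := by
  intro ts
  induction ts with
  | nil =>
    intro sel idx r _ _ _ _ _ _ hlen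
    refine ⟨by simp [pvInnerA, pvRowG, List.take_of_length_le hlen], ?_⟩
    intro _
    exact ⟨by simp [pvInnerA, pvRowG], by simp [pvInnerA], by simp [pvInnerA], by simp [pvInnerA]⟩
  | cons t ts ih =>
    intro sel idx r hnd htg hdisj hgnd hidx hfresh hlen
    have ht0 : t ∈ t :: ts := by simp
    have htnin : t ∉ ts := by simp at hnd; exact hnd.1
    have hgroup : tg.getD t [] = (Gl t).map (fun n => (n, fr n)) := htg t ht0
    have hI : idx.getD t 0 = ((min r (Gl t).length : Nat) : Int) := hidx t ht0
    by_cases h6 : 6 ≤ sel.length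
    · have hres : pvInnerA tg (t :: ts) sel idx = (sel, idx) := by
        rw [pv_innerA_cons, if_pos h6]
      have hsel6 : sel.length = 6 := le_antisymm hlen h6
      constructor
      · rw [hres]
        rw [List.take_append_of_le_length (by omega), List.take_of_length_le (by omega)]
      · intro hcon
        rw [hres] at hcon
        simp at hcon
        omega
    · have hlt6 : sel.length < 6 := by omega
      by_cases hr : r < (Gl t).length
      · -- this tail still has an element at rank r: it is picked
        have hmin : min r (Gl t).length = r := by omega
        have hcond : (idx.getD t 0) < PySem.List.len (tg.getD t []) := by
          rw [hI, hgroup, PySem.List.len_eq, hmin]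
          simp only [List.length_map]
          exact_mod_cast hr
        have hnum : (PySem.List.pyGetD (tg.getD t []) (idx.getD t 0) (0, 0)).1 = (Gl t)[r] := by
          rw [hI, hgroup, hmin, PySem.List.pyGetD_natCast,
            List.getD_eq_getElem _ _ (by simpa using hr)]
          simp
        have hnot : (Gl t)[r] ∉ sel := hfresh t ht0 r le_rfl hr
        have hstep : pvInnerA tg (t :: ts) sel idx
            = pvInnerA tg ts (sel ++ [(Gl t)[r]]) (idx.insert t (idx.getD t 0 + 1)) := by
          rw [pv_innerA_cons, if_neg h6, if_pos hcond, hnum, if_neg hnot]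
        have hrowc : pvRowG Gl (t :: ts) r = (Gl t)[r] :: pvRowG Gl ts r := by
          unfold pvRowG
          rw [List.filter_cons, if_pos (by simp only [PySem.List.len_eq, decide_eq_true_eq]; exact_mod_cast hr)]
          rw [List.map_cons, PySem.List.pyGetD_natCast,
            List.getD_eq_getElem _ _ (by simpa using hr)]
        have hins : ∀ t' ∈ ts, (idx.insert t (idx.getD t 0 + 1)).getD t' 0 = idx.getD t' 0 := by
          intro t' ht'
          rw [PySem.Dict.getD_insert]
          rw [if_neg (by rintro rfl; exact htnin ht')]
        have ihres := ih (sel ++ [(Gl t)[r]]) (idx.insert t (idx.getD t 0 + 1)) r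
          (by simp at hnd; exact hnd.2)
          (fun t' ht' => htg t' (by simp [ht']))
          (fun a ha b hb => hdisj a (by simp [ha]) b (by simp [hb]))
          (fun t' ht' => hgnd t' (by simp [ht']))
          (fun t' ht' => by rw [hins t' ht']; exact hidx t' (by simp [ht']))
          (by
            intro t' ht' i hi hilen
            simp only [List.mem_append, List.mem_singleton]
            push Not
            refine ⟨hfresh t' (by simp [ht']) i hi hilen, ?_⟩
            intro heq
            have hmemt : (Gl t)[r] ∈ Gl t := List.getElem_mem hr
            have hmemt' : (Gl t')[i] ∈ Gl t' := List.getElem_mem hilen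
            have := hdisj t ht0 t' (by simp [ht']) (by rintro rfl; exact htnin ht') _ hmemt
            rw [← heq] at this
            exact this hmemt')
          (by simp; omega)
        rw [hstep, hrowc]
        constructor
        · rw [ihres.1, List.append_assoc]
          rfl
        · intro hlt
          obtain ⟨hfull, hidx2, hunch, hfr2⟩ := ihres.2 hlt
          refine ⟨by rw [hfull, List.append_assoc]; rfl, ?_, ?_, ?_⟩
          · intro t' ht'
            rcases (by simpa using ht' : t' = t ∨ t' ∈ ts) with rfl | ht''
            · rw [hunch t' htnin, PySem.Dict.getD_insert, if_pos rfl, hI, hmin]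
              have : min (r+1) (Gl t').length = r + 1 := by omega
              rw [this]
              push_cast
              ring
            · exact hidx2 t' ht''
          · intro t'' ht''
            rw [hunch t'' (by simp at ht''; exact ht''.2), PySem.Dict.getD_insert,
              if_neg (by simp at ht''; exact ht''.1)]
          · intro t' ht' i hi hilen
            rcases (by simpa using ht' : t' = t ∨ t' ∈ ts) with rfl | ht''
            · rw [hfull]
              simp only [List.append_assoc, List.mem_append, List.mem_singleton]
              push Not
              refine ⟨hfresh t' ht0 i (by omega) hilen, ?_, ?_⟩
              · intro heq
                have := ((hgnd t' ht0).getElem_inj_iff (hi := hilen) (hj := hr)).mp heq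
                omega
              · intro hmem
                unfold pvRowG at hmem
                simp only [List.mem_map, List.mem_filter] at hmem
                obtain ⟨u, ⟨hu, hulen⟩, hval⟩ := hmem
                have hur : (r : Int) < PySem.List.len (Gl u) := by simpa using hulen
                rw [PySem.List.len_eq] at hur
                have hurn : r < (Gl u).length := by exact_mod_cast hur
                rw [PySem.List.pyGetD_natCast, List.getD_eq_getElem _ _ hurn] at hval
                have hmemu : (Gl t')[i] ∈ Gl u := hval ▸ List.getElem_mem hurn
                exact hdisj t' ht0 u (by simp [hu]) (by rintro rfl; exact htnin hu) _ (List.getElem_mem hilen) hmemu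
            · exact hfr2 t' ht'' i hi hilen
      · -- this tail is exhausted at rank r: skipped
        have hmin : min r (Gl t).length = (Gl t).length := by omega
        have hcond : ¬ ((idx.getD t 0) < PySem.List.len (tg.getD t [])) := by
          rw [hI, hgroup, PySem.List.len_eq, hmin]
          simp only [List.length_map]
          omega
        have hstep : pvInnerA tg (t :: ts) sel idx = pvInnerA tg ts sel idx := by
          rw [pv_innerA_cons, if_neg h6, if_neg hcond]
        have hrowc : pvRowG Gl (t :: ts) r = pvRowG Gl ts r := by
          unfold pvRowG
          rw [List.filter_cons, if_neg (by simp only [PySem.List.len_eq, decide_eq_true_eq]; push Not; exact_mod_cast (by omega : ((Gl t).length : Int) ≤ (r : Int)))]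
        have ihres := ih sel idx r
          (by simp at hnd; exact hnd.2)
          (fun t' ht' => htg t' (by simp [ht']))
          (fun a ha b hb => hdisj a (by simp [ha]) b (by simp [hb]))
          (fun t' ht' => hgnd t' (by simp [ht']))
          (fun t' ht' => hidx t' (by simp [ht']))
          (fun t' ht' i hi hilen => hfresh t' (by simp [ht']) i hi hilen)
          hlen
        rw [hstep, hrowc]
        refine ⟨ihres.1, ?_⟩
        intro hlt
        obtain ⟨hfull, hidx2, hunch, hfr2⟩ := ihres.2 hlt
        refine ⟨hfull, ?_, ?_, ?_⟩
        · intro t' ht'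
          rcases (by simpa using ht' : t' = t ∨ t' ∈ ts) with rfl | ht''
          · rw [hunch t' htnin, hI, hmin]
            congr 1
            omega
          · exact hidx2 t' ht''
        · intro t'' ht''
          exact hunch t'' (by simp at ht''; exact ht''.2)
        · intro t' ht' i hi hilen
          rcases (by simpa using ht' : t' = t ∨ t' ∈ ts) with rfl | ht''
          · omega
          · exact hfr2 t' ht'' i hi hilen

theorem pv_whileA_cons (tg : PySem.Dict Int (List (Int × Int))) (tails : List Int)
    (fuel : Nat) (sel : List Int) (idx : PySem.Dict Int Int) (round : Int) :
    pvWhileA tg tails (fuel + 1) sel idx round =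
      if sel.length < 6 then
        (if 10 < round + 1 then (pvInnerA tg tails sel idx).1
         else pvWhileA tg tails fuel (pvInnerA tg tails sel idx).1 (pvInnerA tg tails sel idx).2 (round + 1))
      else sel := rfl

theorem pv_whileA_spec (tg : PySem.Dict Int (List (Int × Int))) (Gl : Int → List Int)
    (fr : Int → Int) (tails : List Int)
    (hnd : tails.Nodup)
    (htg : ∀ t ∈ tails, tg.getD t [] = (Gl t).map (fun n => (n, fr n)))
    (hdisj : ∀ t ∈ tails, ∀ t' ∈ tails, t ≠ t' → ∀ n ∈ Gl t, n ∉ Gl t')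
    (hgnd : ∀ t ∈ tails, (Gl t).Nodup)
    (rounds : Int)
    (hrb : ∀ t ∈ tails, ((Gl t).length : Int) ≤ rounds)
    (hr10 : rounds ≤ 10) :
    ∀ (k : Nat) (r : Nat) (sel : List Int) (idx : PySem.Dict Int Int),
      (k : Int) = 12 - r → r ≤ 11 →
      sel.length ≤ 6 →
      (sel.length < 6 →
        (∀ t ∈ tails, idx.getD t 0 = ((min r (Gl t).length : Nat) : Int)) ∧
        (∀ t ∈ tails, ∀ i : Nat, r ≤ i → ∀ hi : i < (Gl t).length, (Gl t)[i] ∉ sel)) →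
      pvWhileA tg tails k sel idx (r : Int) = (sel ++ pvOrdFrom Gl tails (r : Int) rounds).take 6 := by
  have hrow_empty : ∀ r' : Int, rounds ≤ r' → pvRowG Gl tails r' = [] := by
    intro r' hge
    unfold pvRowG
    rw [List.filter_eq_nil_iff.2, List.map_nil]
    intro t ht
    simp only [decide_eq_true_eq]
    push Not
    rw [PySem.List.len_eq]
    exact le_trans (hrb t ht) hge
  have hord_nil : ∀ r' : Int, rounds ≤ r' → pvOrdFrom Gl tails r' rounds = [] := by
    intro r' hge
    unfold pvOrdFrom
    rw [PySem.List.pyRange_one_eq_nil hge, List.flatMap_nil]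
  have hord_split : ∀ r' : Int, r' < rounds →
      pvOrdFrom Gl tails r' rounds = pvRowG Gl tails r' ++ pvOrdFrom Gl tails (r' + 1) rounds := by
    intro r' hlt
    unfold pvOrdFrom
    rw [PySem.List.pyRange_one_cons hlt, List.flatMap_cons]
  intro k
  induction k with
  | zero =>
    intro r sel idx hk hr11 _ _
    exfalso
    push_cast at hk
    omega
  | succ k' ih =>
    intro r sel idx hk hr11 hlen hinv
    rw [pv_whileA_cons]
    by_cases hsel : sel.length < 6
    · obtain ⟨hidx, hfresh⟩ := hinv hsel
      have ispec := pv_innerA_spec tg Gl fr tails sel idx r hnd htg hdisj hgnd hidx hfresh hlen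
      by_cases h10 : 10 < (r : Int) + 1
      · rw [if_pos hsel, if_pos h10]
        have hge : rounds ≤ (r : Int) := by omega
        rw [ispec.1, hrow_empty _ hge, hord_nil _ hge]
      · rw [if_pos hsel, if_neg h10]
        have hcast : (r : Int) + 1 = ((r + 1 : Nat) : Int) := by push_cast; ring
        by_cases hlt : (pvInnerA tg tails sel idx).1.length < 6
        · obtain ⟨hfull, hidx2, hunch, hfr2⟩ := ispec.2 hlt
          have IH := ih (r + 1) (pvInnerA tg tails sel idx).1 (pvInnerA tg tails sel idx).2
            (by push_cast at hk ⊢; omega) (by omega) (by omega)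
            (fun _ => ⟨hidx2, hfr2⟩)
          rw [hcast, IH, hfull]
          by_cases hrlt : (r : Int) < rounds
          · rw [hord_split _ hrlt, ← List.append_assoc, hcast]
          · rw [hrow_empty _ (by omega), hord_nil _ (by omega),
              hord_nil _ (by push_cast; omega)]
            simp
        · have h6 : (pvInnerA tg tails sel idx).1.length = 6 := by
            have hle : (pvInnerA tg tails sel idx).1.length ≤ 6 := by
              rw [ispec.1, List.length_take]
              exact min_le_left _ _
            omega
          have hnext : pvWhileA tg tails k' (pvInnerA tg tails sel idx).1
              (pvInnerA tg tails sel idx).2 ((r : Int) + 1) = (pvInnerA tg tails sel idx).1 := by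
            cases k' with
            | zero => exfalso; push_cast at hk; omega
            | succ k'' => rw [pv_whileA_cons, if_neg (by omega)]
          rw [hnext, ispec.1]
          have hlen6 : 6 ≤ (sel ++ pvRowG Gl tails (r : Int)).length := by
            rw [ispec.1, List.length_take] at h6
            omega
          by_cases hrlt : (r : Int) < rounds
          · rw [hord_split _ hrlt, ← List.append_assoc,
              List.take_append_of_le_length hlen6]
          · rw [hrow_empty _ (by omega), hord_nil _ (by omega)]
    · rw [if_neg hsel]
      have h6 : sel.length = 6 := by omega
      rw [List.take_append_of_le_length (by omega), List.take_of_length_le (by omega)]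

theorem pv_tg0A_getD (t : Int) : pvTg0A.getD t [] = [] := by
  unfold pvTg0A
  rw [pv_getD_foldl_insert (fun _ => []) _ (by decide)]
  split <;> simp

theorem pv_keys_fold (ex : List Int) (freq : PySem.Dict Int Int) :
    ∀ (L : List Int) (d : PySem.Dict Int (List (Int × Int))), d.keys = PySem.List.pyRange 0 10 1 →
      ((L.foldl (fun d n => if !ex.contains n then d.modify (PySem.Int.mod n 10) [] (fun g => g ++ [(n, freq.getD n 0)]) else d) d).keys)
        = PySem.List.pyRange 0 10 1 := by
  intro L
  induction L with
  | nil => intro d hd; exact hd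
  | cons n L ih =>
    intro d hd
    simp only [List.foldl_cons]
    apply ih
    by_cases hc : (!ex.contains n) = true
    · rw [if_pos hc]
      unfold PySem.Dict.modify
      rw [PySem.Dict.keys_insert_of_contains _ _ ?_]
      · exact hd
      · rw [PySem.Dict.contains_iff_mem_keys, hd, PySem.List.mem_pyRange_one]
        constructor
        · exact PySem.Int.mod_nonneg n (by norm_num)
        · exact PySem.Int.mod_lt n (by norm_num)
    · rw [if_neg hc]; exact hd

theorem pv_tg1A_keys (ex : List Int) (freq : PySem.Dict Int Int) :
    (pvTg1A ex freq).keys = PySem.List.pyRange 0 10 1 := by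
  unfold pvTg1A
  exact pv_keys_fold ex freq _ _ (by decide)

theorem pv_tg1A_getD (ex : List Int) (freq : PySem.Dict Int Int) (t : Int) :
    (pvTg1A ex freq).getD t []
      = ((PySem.List.pyRange 1 50 1).filter (fun n => !ex.contains n && (PySem.Int.mod n 10 == t))).map
          (fun n => (n, freq.getD n 0)) := by
  unfold pvTg1A
  rw [pv_getD_foldl_modify_append (fun n => !ex.contains n) (fun n => freq.getD n 0)
    (PySem.List.pyRange 1 50 1) pvTg0A t, pv_tg0A_getD, List.nil_append]

theorem pv_tgA_getD (ex : List Int) (freq : PySem.Dict Int Int) (t : Int)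
    (ht : t ∈ PySem.List.pyRange 0 10 1) :
    (pvTgA ex freq).getD t [] = (pvG ex freq t).map (fun n => (n, freq.getD n 0)) := by
  have hb := (PySem.List.mem_pyRange_one).1 ht
  unfold pvTgA
  rw [pv_tg1A_keys, pv_getD_foldl_modify_sort _ (by decide) _ t, if_pos ht, pv_tg1A_getD]
  have hF : (PySem.List.pyRange 1 50 1).filter (fun n => !ex.contains n && (PySem.Int.mod n 10 == t))
      = pvCand ex t := by
    rw [← List.filter_filter, pv_range_filter_mod t hb.1 hb.2]
    rfl
  rw [hF, pv_sorted_map_pair]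
  rfl

theorem pv_mem_tails {ex : List Int} {freq : PySem.Dict Int Int} {t : Int}
    (ht : t ∈ pvTails ex freq) :
    t ∈ PySem.List.pyRange 0 10 1 ∧ pvG ex freq t ≠ [] := by
  unfold pvTails at ht
  rw [PySem.List.mem_sorted] at ht
  unfold pvAvail at ht
  rw [List.mem_filter] at ht
  refine ⟨ht.1, ?_⟩
  have := ht.2
  simpa using this

theorem pv_nodup_tails (ex : List Int) (freq : PySem.Dict Int Int) :
    (pvTails ex freq).Nodup := by
  unfold pvTails
  refine ((PySem.List.sorted_perm _ _ _).nodup_iff).mpr ?_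
  unfold pvAvail
  exact List.Nodup.filter _ (by decide)

theorem pv_len_le_rounds {ex : List Int} {freq : PySem.Dict Int Int} {t : Int}
    (ht : t ∈ pvTails ex freq) :
    PySem.List.len (pvG ex freq t) ≤ pvRounds ex freq := by
  unfold pvRounds PySem.List.maxD
  have hmem : PySem.List.len (pvG ex freq t)
      ∈ (pvTails ex freq).map (fun t => PySem.List.len (pvG ex freq t)) :=
    List.mem_map_of_mem ht
  cases hmax : PySem.List.max? ((pvTails ex freq).map (fun t => PySem.List.len (pvG ex freq t))) (fun x => x) with
  | none =>
    rw [PySem.List.max?_eq_none_iff] at hmax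
    rw [hmax] at hmem
    simp at hmem
  | some m =>
    simpa using PySem.List.max?_isMax hmax _ hmem

theorem pv_rounds_bounds (ex : List Int) (freq : PySem.Dict Int Int) :
    0 ≤ pvRounds ex freq ∧ pvRounds ex freq ≤ 10 := by
  unfold pvRounds PySem.List.maxD
  cases hmax : PySem.List.max? ((pvTails ex freq).map (fun t => PySem.List.len (pvG ex freq t))) (fun x => x) with
  | none => simp
  | some m =>
    have hm := PySem.List.max?_mem hmax
    rw [List.mem_map] at hm
    obtain ⟨t, ht, hval⟩ := hm
    have hb := (PySem.List.mem_pyRange_one).1 (pv_mem_tails ht).1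
    have hlen := pv_len_pvG ex freq t hb.1 hb.2
    rw [PySem.List.len_eq] at hval
    simp only [Option.getD_some]
    omega

theorem pv_slice_nil (b : Int) : PySem.List.slice ([] : List Int) none (some b) = [] := by
  rw [List.eq_nil_iff_forall_not_mem]
  intro a ha
  have := PySem.List.mem_of_mem_slice _ _ _ ha
  simp at this

theorem pv_mem_order (ex : List Int) (freq : PySem.Dict Int Int) {n : Int}
    (h1 : 1 ≤ n) (h2 : n < 50) (hex : ex.contains n = false) :
    n ∈ pvOrder ex freq := by
  have ht0 : 0 ≤ n % 10 := Int.emod_nonneg n (by norm_num)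
  have ht1 : n % 10 < 10 := Int.emod_lt_of_pos n (by norm_num)
  have hcand : n ∈ pvCand ex (n % 10) := pv_mem_cand_of h1 h2 hex
  have hG : n ∈ pvG ex freq (n % 10) := pv_mem_pvG.2 hcand
  have hne : pvG ex freq (n % 10) ≠ [] := List.ne_nil_of_mem hG
  have htails : n % 10 ∈ pvTails ex freq := by
    unfold pvTails
    rw [PySem.List.mem_sorted]
    unfold pvAvail
    rw [List.mem_filter]
    constructor
    · rw [PySem.List.mem_pyRange_one]; exact ⟨ht0, ht1⟩
    · simpa using hne
  obtain ⟨i, hi, hval⟩ := List.mem_iff_getElem.1 hG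
  unfold pvOrder pvOrdFrom
  rw [List.mem_flatMap]
  refine ⟨(i : Int), ?_, ?_⟩
  · rw [PySem.List.mem_pyRange_one]
    have hle := pv_len_le_rounds htails
    rw [PySem.List.len_eq] at hle
    constructor
    · exact_mod_cast Int.natCast_nonneg i
    · have : (i : Int) < ((pvG ex freq (n % 10)).length : Int) := by exact_mod_cast hi
      omega
  · unfold pvRowG
    rw [List.mem_map]
    refine ⟨n % 10, ?_, ?_⟩
    · rw [List.mem_filter]
      refine ⟨htails, ?_⟩
      simp only [decide_eq_true_eq, PySem.List.len_eq]
      exact_mod_cast hi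
    · rw [PySem.List.pyGetD_natCast, List.getD_eq_getElem _ _ hi, hval]

theorem pv_idx0A_getD (t : Int) : pvIdx0A.getD t 0 = 0 := by
  unfold pvIdx0A
  rw [pv_getD_foldl_insert (fun _ => (0 : Int)) _ (by decide)]
  split <;> simp

set_option maxHeartbeats 2000000 in
theorem pv_selectA_eq (ex : List Int) (freq : PySem.Dict Int Int) :
    pvSelectA ex freq
      = PySem.List.sorted (PySem.List.slice (pvOrder ex freq) none (some 6)) (fun n => n) false := by
  simp only [pvSelectA]
  have havailA : (PySem.List.pyRange 0 10 1).filter (fun t => !((pvTgA ex freq).getD t []).isEmpty)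
      = pvAvail ex freq := by
    unfold pvAvail
    apply List.filter_congr
    intro t ht
    rw [pv_tgA_getD ex freq t ht, List.isEmpty_map]
  have htailsA : PySem.List.sorted
      ((PySem.List.pyRange 0 10 1).filter (fun t => !((pvTgA ex freq).getD t []).isEmpty))
      (fun t => match (pvTgA ex freq).getD t [] with | [] => (0 : Int) | p :: _ => p.2) true
      = pvTails ex freq := by
    rw [havailA]
    unfold pvTails
    apply pv_sorted_rev_eq_sorted_of
    intro t ht
    unfold pvAvail at ht
    rw [List.mem_filter] at ht
    have htr : t ∈ PySem.List.pyRange 0 10 1 := ht.1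
    have hne : pvG ex freq t ≠ [] := by simpa using ht.2
    cases hg : pvG ex freq t with
    | nil => exact absurd hg hne
    | cons h tl =>
      rw [pv_tgA_getD ex freq t htr, hg, PySem.List.pyGetD_zero_cons]
      simp
  rw [htailsA]
  have htgT : ∀ t ∈ pvTails ex freq,
      (pvTgA ex freq).getD t [] = (pvG ex freq t).map (fun n => (n, freq.getD n 0)) :=
    fun t ht => pv_tgA_getD ex freq t (pv_mem_tails ht).1
  have hdisjT : ∀ t ∈ pvTails ex freq, ∀ t' ∈ pvTails ex freq, t ≠ t' →
      ∀ n ∈ pvG ex freq t, n ∉ pvG ex freq t' := by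
    intro t ht t' ht' hne n hn
    have hb := (PySem.List.mem_pyRange_one).1 (pv_mem_tails ht).1
    have hb' := (PySem.List.mem_pyRange_one).1 (pv_mem_tails ht').1
    exact pv_disj_pvG hb.1 hb.2 hb'.1 hb'.2 hne hn
  have hgndT : ∀ t ∈ pvTails ex freq, (pvG ex freq t).Nodup := by
    intro t ht
    have hb := (PySem.List.mem_pyRange_one).1 (pv_mem_tails ht).1
    exact pv_nodup_pvG ex freq t hb.1 hb.2
  have hrbT : ∀ t ∈ pvTails ex freq, ((pvG ex freq t).length : Int) ≤ pvRounds ex freq := by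
    intro t ht
    have := pv_len_le_rounds ht
    rwa [PySem.List.len_eq] at this
  have hwhile := pv_whileA_spec (pvTgA ex freq) (pvG ex freq) (fun n => freq.getD n 0)
    (pvTails ex freq) (pv_nodup_tails ex freq) htgT hdisjT hgndT (pvRounds ex freq) hrbT
    (pv_rounds_bounds ex freq).2 12 0 [] pvIdx0A (by norm_num) (by norm_num) (by simp)
    (fun _ => ⟨fun t ht => by rw [pv_idx0A_getD]; simp, fun t ht i _ hi => by simp⟩)
  have h0 : ((0 : Nat) : Int) = (0 : Int) := by norm_num
  rw [h0] at hwhile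
  have hwhile' : pvWhileA (pvTgA ex freq) (pvTails ex freq) 12 [] pvIdx0A 0
      = (pvOrder ex freq).take 6 := by
    rw [hwhile, List.nil_append]
    rfl
  rw [hwhile']
  by_cases hlt : ((pvOrder ex freq).take 6).length < 6
  · rw [if_pos hlt]
    have hOlen : (pvOrder ex freq).length < 6 := by
      rw [List.length_take] at hlt
      omega
    have hOeq : (pvOrder ex freq).take 6 = pvOrder ex freq :=
      List.take_of_length_le (by omega)
    rw [hOeq]
    have hrem : (PySem.List.pyRange 1 50 1).filter
        (fun n => !(pvOrder ex freq).contains n && !ex.contains n) = [] := by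
      rw [List.filter_eq_nil_iff]
      intro n hn
      rw [PySem.List.mem_pyRange_one] at hn
      intro hpred
      simp only [Bool.and_eq_true, Bool.not_eq_true'] at hpred
      have hmem : n ∈ pvOrder ex freq :=
        pv_mem_order ex freq (by omega) (by omega) hpred.2
      rw [← List.contains_iff_mem] at hmem
      rw [hpred.1] at hmem
      cases hmem
    rw [hrem]
    have hsn : PySem.List.sorted ([] : List Int) (fun n => freq.getD n 0) true = [] := rfl
    rw [hsn, pv_slice_nil, List.append_nil]
  · rw [if_neg hlt]
    rw [PySem.List.slice_to _ (by norm_num), PySem.List.slice_to _ (by norm_num)]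
    norm_num [List.take_take]

-- strict lexicographic order on (key value, number): the position order of a stable
-- ascending-input sort by that key
def pvLexB (k : Int → Int) (a b : Int) : Bool :=
  (k a < k b) || (k a == k b && a < b)

theorem pv_lexB_irrefl (k : Int → Int) (a : Int) : pvLexB k a a = false := by
  simp [pvLexB]

theorem pv_lexB_asymm {k : Int → Int} {a b : Int}
    (h1 : pvLexB k a b = true) (h2 : pvLexB k b a = true) : False := by
  simp only [pvLexB, Bool.or_eq_true, Bool.and_eq_true, decide_eq_true_eq, beq_iff_eq] at h1 h2
  omega

theorem pv_insertBy_lex (k : Int → Int) (x : Int) :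
    ∀ acc : List Int, acc.Pairwise (fun a b => pvLexB k a b = true) →
      (∀ y ∈ acc, y < x) →
      (PySem.List.insertBy (fun a b => decide (k a < k b)) x acc).Pairwise
        (fun a b => pvLexB k a b = true) := by
  intro acc
  induction acc with
  | nil => intro _ _; simp [PySem.List.insertBy]
  | cons y ys ih =>
    intro hpw hlt
    rw [List.pairwise_cons] at hpw
    simp only [PySem.List.insertBy]
    by_cases hc : (decide (k x < k y) : Bool) = true
    · rw [if_pos hc]
      simp only [decide_eq_true_eq] at hc
      refine List.Pairwise.cons ?_ (List.Pairwise.cons hpw.1 hpw.2)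
      intro z hz
      rcases (by simpa using hz : z = y ∨ z ∈ ys) with rfl | hz'
      · simp only [pvLexB, Bool.or_eq_true, decide_eq_true_eq]
        exact Or.inl hc
      · have := hpw.1 z hz'
        simp only [pvLexB, Bool.or_eq_true, Bool.and_eq_true, decide_eq_true_eq, beq_iff_eq] at this ⊢
        omega
    · rw [if_neg hc]
      simp only [decide_eq_true_eq, Bool.not_eq_true] at hc
      refine List.Pairwise.cons ?_ (ih hpw.2 (fun z hz => hlt z (by simp [hz])))
      intro z hz
      rcases (PySem.List.mem_insertBy _ _ _ _).1 hz with hzx | hz'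
      · rw [hzx]
        have hyx : y < x := hlt y (by simp)
        simp only [pvLexB, Bool.or_eq_true, Bool.and_eq_true, decide_eq_true_eq, beq_iff_eq]
        by_cases he : k y = k x
        · exact Or.inr ⟨he, hyx⟩
        · left
          have : ¬ (k x < k y) := by simpa using hc
          omega
      · exact hpw.1 z hz'

theorem pv_foldl_insertBy_lex (k : Int → Int) :
    ∀ (xs acc : List Int), xs.Pairwise (fun a b => a < b) →
      acc.Pairwise (fun a b => pvLexB k a b = true) →
      (∀ a ∈ acc, ∀ b ∈ xs, a < b) →
      (xs.foldl (fun acc x => PySem.List.insertBy (fun a b => decide (k a < k b)) x acc) acc).Pairwise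
        (fun a b => pvLexB k a b = true) := by
  intro xs
  induction xs with
  | nil => intro acc _ h _; exact h
  | cons x xs ih =>
    intro acc hxs hacc hcross
    rw [List.pairwise_cons] at hxs
    simp only [List.foldl_cons]
    apply ih _ hxs.2
    · exact pv_insertBy_lex k x acc hacc (fun y hy => hcross y hy x (by simp))
    · intro a ha b hb
      rcases (PySem.List.mem_insertBy _ _ _ _).1 ha with rfl | ha'
      · exact hxs.1 b hb
      · exact hcross a ha' b (by simp [hb])

-- a stable sort of a strictly ascending list is strictly (key, value)-lexicographically ordered
theorem pv_sorted_pairwise_lex (k : Int → Int) (xs : List Int)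
    (h : xs.Pairwise (fun a b => a < b)) :
    (PySem.List.sorted xs k false).Pairwise (fun a b => pvLexB k a b = true) := by
  rw [PySem.List.sorted_eq_foldl_insertBy]
  exact pv_foldl_insertBy_lex k xs [] h (by simp) (by simp)

-- in a strictly lex-ordered list, the number of elements before L[i] is i
theorem pv_countP_index (k : Int → Int) :
    ∀ (L : List Int), L.Pairwise (fun a b => pvLexB k a b = true) →
      ∀ (i : Nat) (hi : i < L.length),
        L.countP (fun m => pvLexB k m L[i]) = i := by
  intro L
  induction L with
  | nil => intro _ i hi; simp at hi
  | cons a L ih =>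
    intro hpw i hi
    rw [List.pairwise_cons] at hpw
    cases i with
    | zero =>
      simp only [List.getElem_cons_zero, List.countP_cons, pv_lexB_irrefl, if_neg]
      rw [List.countP_eq_zero.2 (fun m hm => by
        simp only [Bool.not_eq_true]
        by_cases hx : pvLexB k m a = true
        · exact absurd (pv_lexB_asymm (hpw.1 m hm) hx) (fun h => h)
        · simpa using hx)]
      simp [pv_lexB_irrefl]
    | succ j =>
      have hj : j < L.length := by simpa using hi
      have hget : (a :: L)[j + 1] = L[j] := by simp
      rw [hget, List.countP_cons, ih hpw.2 j hj]
      have : pvLexB k a L[j] = true := hpw.1 _ (List.getElem_mem hj)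
      simp [this]

theorem pv_countP_lt (k : Int → Int) {L : List Int}
    (hpw : L.Pairwise (fun a b => pvLexB k a b = true)) {t t' : Int}
    (ht : t ∈ L) (ht' : t' ∈ L) (hlex : pvLexB k t t' = true) :
    L.countP (fun m => pvLexB k m t) < L.countP (fun m => pvLexB k m t') := by
  obtain ⟨i, hi, rfl⟩ := List.mem_iff_getElem.1 ht
  obtain ⟨j, hj, rfl⟩ := List.mem_iff_getElem.1 ht'
  rw [pv_countP_index k L hpw i hi, pv_countP_index k L hpw j hj]
  rcases lt_trichotomy i j with h | h | h
  · exact h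
  · subst h
    rw [pv_lexB_irrefl] at hlex
    cases hlex
  · exfalso
    have := (List.pairwise_iff_getElem.1 hpw) j i hj hi h
    exact pv_lexB_asymm hlex this

theorem pv_countP_lt_length (k : Int → Int) {L : List Int}
    (hpw : L.Pairwise (fun a b => pvLexB k a b = true)) {t : Int} (ht : t ∈ L) :
    L.countP (fun m => pvLexB k m t) < L.length := by
  obtain ⟨i, hi, rfl⟩ := List.mem_iff_getElem.1 ht
  rw [pv_countP_index k L hpw i hi]
  exact hi

theorem pv_pairwise_pyRange_one : ∀ (n : Nat) (a b : Int), (b - a).toNat ≤ n →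
    (PySem.List.pyRange a b 1).Pairwise (fun x y => x < y) := by
  intro n
  induction n with
  | zero =>
    intro a b h
    have : b ≤ a := by omega
    rw [PySem.List.pyRange_one_eq_nil this]
    exact List.Pairwise.nil
  | succ m ih =>
    intro a b h
    by_cases hab : a < b
    · rw [PySem.List.pyRange_one_cons hab]
      refine List.Pairwise.cons ?_ (ih (a + 1) b (by omega))
      intro y hy
      have := (PySem.List.mem_pyRange_one).1 hy
      omega
    · rw [PySem.List.pyRange_one_eq_nil (by omega)]
      exact List.Pairwise.nil

theorem pv_pairwise_cand (ex : List Int) (t : Int) (h0 : 0 ≤ t) (h1 : t < 10) :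
    (pvCand ex t).Pairwise (fun a b => a < b) := by
  unfold pvCand
  refine List.Pairwise.filter _ ?_
  interval_cases t <;> decide

theorem pv_pairwise_pvG (ex : List Int) (freq : PySem.Dict Int Int) (t : Int)
    (h0 : 0 ≤ t) (h1 : t < 10) :
    (pvG ex freq t).Pairwise (fun a b => pvLexB (fun n => -(freq.getD n 0)) a b = true) :=
  pv_sorted_pairwise_lex _ _ (pv_pairwise_cand ex t h0 h1)

theorem pv_pairwise_tails (ex : List Int) (freq : PySem.Dict Int Int) :
    (pvTails ex freq).Pairwise
      (fun a b => pvLexB (fun t => -(freq.getD (PySem.List.pyGetD (pvG ex freq t) 0 0) 0)) a b = true) := by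
  unfold pvTails
  apply pv_sorted_pairwise_lex
  unfold pvAvail
  exact List.Pairwise.filter _ (by decide)

theorem pv_nodup_candB (ex : List Int) : (pvCandB ex).Nodup :=
  List.Nodup.filter _ (by decide)

theorem pv_mem_candB {ex : List Int} {n : Int} :
    n ∈ pvCandB ex ↔ 1 ≤ n ∧ n < 50 ∧ ex.contains n = false := by
  unfold pvCandB
  rw [List.mem_filter, PySem.List.mem_pyRange_one]
  simp only [Bool.not_eq_true']
  tauto

theorem pv_filter_candB (ex : List Int) (t : Int) (h0 : 0 ≤ t) (h1 : t < 10) :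
    (pvCandB ex).filter (fun n => PySem.Int.mod n 10 == t) = pvCand ex t := by
  unfold pvCandB
  rw [List.filter_comm, pv_range_filter_mod t h0 h1]
  rfl

theorem pv_mod_eq_emod (n : Int) : PySem.Int.mod n 10 = n % 10 :=
  PySem.Int.mod_eq_emod_of_pos (by norm_num)

theorem pv_mem_avail {ex : List Int} {freq : PySem.Dict Int Int} {t : Int} :
    t ∈ pvAvail ex freq ↔ (0 ≤ t ∧ t < 10 ∧ pvG ex freq t ≠ []) := by
  unfold pvAvail
  rw [List.mem_filter, PySem.List.mem_pyRange_one]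
  simp [and_assoc]

theorem pv_mem_tailsB {ex : List Int} (freq : PySem.Dict Int Int) {t : Int} :
    t ∈ pvTailsB ex ↔ t ∈ pvAvail ex freq := by
  rw [pv_mem_avail]
  unfold pvTailsB
  rw [PySem.Set.mem_ofList, List.mem_map]
  constructor
  · rintro ⟨n, hn, rfl⟩
    obtain ⟨h1, h2, h3⟩ := pv_mem_candB.1 hn
    rw [pv_mod_eq_emod]
    refine ⟨Int.emod_nonneg n (by norm_num), Int.emod_lt_of_pos n (by norm_num), ?_⟩
    exact List.ne_nil_of_mem (pv_mem_pvG.2 (pv_mem_cand_of h1 h2 h3))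
  · rintro ⟨h0, h1, hne⟩
    obtain ⟨n, hn⟩ := List.exists_mem_of_ne_nil _ hne
    obtain ⟨g1, g2, g3, g4⟩ := pv_mem_cand h0 h1 (pv_mem_pvG.1 hn)
    exact ⟨n, pv_mem_candB.2 ⟨g1, g2, g4⟩, by rw [pv_mod_eq_emod]; exact g3⟩

theorem pv_mem_tails_iff {ex : List Int} {freq : PySem.Dict Int Int} {t : Int} :
    t ∈ pvTails ex freq ↔ t ∈ pvAvail ex freq := by
  unfold pvTails
  exact PySem.List.mem_sorted _ _ _ t

theorem pv_nodup_tailsB (ex : List Int) : (pvTailsB ex).Nodup := by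
  unfold pvTailsB
  exact PySem.Set.nodup_ofList _

theorem pv_perm_tailsB (ex : List Int) (freq : PySem.Dict Int Int) :
    (pvTailsB ex).Perm (pvTails ex freq) := by
  rw [List.perm_ext_iff_of_nodup (pv_nodup_tailsB ex) (pv_nodup_tails ex freq)]
  intro t
  rw [pv_mem_tailsB freq, pv_mem_tails_iff]

theorem pv_topB_getD (ex : List Int) (freq : PySem.Dict Int Int) {t : Int}
    (ht : t ∈ pvTailsB ex) :
    (pvTopB ex freq).getD t 0
      = ((PySem.List.max?
          (((pvCandB ex).filter (fun n => PySem.Int.mod n 10 == t)).map (fun n => freq.getD n 0))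
          (fun x => x)).getD 0) := by
  unfold pvTopB
  rw [pv_getD_foldl_insert _ _ (pv_nodup_tailsB ex), if_pos ht]

-- the 'top' of a tail class is the frequency of the head of its sorted group
theorem pv_top_eq (ex : List Int) (freq : PySem.Dict Int Int) {t : Int}
    (ht : t ∈ pvTails ex freq) :
    (pvTopB ex freq).getD t 0 = freq.getD (PySem.List.pyGetD (pvG ex freq t) 0 0) 0 := by
  have htB : t ∈ pvTailsB ex := (pv_mem_tailsB freq).2 (pv_mem_tails_iff.1 ht)
  have hav := pv_mem_avail.1 (pv_mem_tails_iff.1 ht)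
  obtain ⟨h0, h1, hne⟩ := hav
  rw [pv_topB_getD ex freq htB, pv_filter_candB ex t h0 h1]
  cases hg : pvG ex freq t with
  | nil => exact absurd hg hne
  | cons h tl =>
    rw [PySem.List.pyGetD_zero_cons]
    have hhead : ∀ y ∈ pvCand ex t, freq.getD y 0 ≤ freq.getD h 0 := by
      intro y hy
      have := PySem.List.key_head_sorted_le (xs := pvCand ex t)
        (key := fun n => -(freq.getD n 0)) hg y hy
      simp only [] at this
      omega
    have hhc : h ∈ pvCand ex t := pv_mem_pvG.1 (by rw [hg]; simp)
    have hV : freq.getD h 0 ∈ (pvCand ex t).map (fun n => freq.getD n 0) :=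
      List.mem_map_of_mem hhc
    cases hmax : PySem.List.max? ((pvCand ex t).map (fun n => freq.getD n 0)) (fun x => x) with
    | none =>
      rw [PySem.List.max?_eq_none_iff] at hmax
      rw [hmax] at hV
      simp at hV
    | some m =>
      have hmem := PySem.List.max?_mem hmax
      have hle : freq.getD h 0 ≤ m := by simpa using PySem.List.max?_isMax hmax _ hV
      obtain ⟨y, hy, heq⟩ := List.mem_map.1 hmem
      have hge : m ≤ freq.getD h 0 := by rw [← heq]; exact hhead y hy
      simp only [Option.getD_some]
      omega

theorem pv_trankB_getD (ex : List Int) (freq : PySem.Dict Int Int) {t : Int}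
    (ht : t ∈ pvTailsB ex) :
    (pvTrankB ex freq).getD t 0
      = (((pvTailsB ex).countP (fun u =>
          ((pvTopB ex freq).getD t 0 < (pvTopB ex freq).getD u 0) ||
          ((pvTopB ex freq).getD u 0 == (pvTopB ex freq).getD t 0 && -t < -u)) : Nat) : Int) := by
  unfold pvTrankB
  dsimp only
  rw [pv_getD_foldl_insert _ _ (pv_nodup_tailsB ex), if_pos ht]

-- trank[t] counts exactly the tails that the canonical tail order places before t
theorem pv_trank_eq (ex : List Int) (freq : PySem.Dict Int Int) {t : Int}
    (ht : t ∈ pvTails ex freq) :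
    (pvTrankB ex freq).getD t 0
      = (((pvTails ex freq).countP (fun u =>
          pvLexB (fun u => -(freq.getD (PySem.List.pyGetD (pvG ex freq u) 0 0) 0)) u t) : Nat) : Int) := by
  have htB : t ∈ pvTailsB ex := (pv_mem_tailsB freq).2 (pv_mem_tails_iff.1 ht)
  rw [pv_trankB_getD ex freq htB]
  congr 1
  rw [List.Perm.countP_eq _ (pv_perm_tailsB ex freq)]
  apply List.countP_congr
  intro u hu
  rw [pv_top_eq ex freq hu, pv_top_eq ex freq ht, Bool.eq_iff_iff]
  simp only [pvLexB, Bool.or_eq_true, Bool.and_eq_true, decide_eq_true_eq, beq_iff_eq, iff_true]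
  omega

theorem pv_beats_lex (freq : PySem.Dict Int Int) (m n : Int) :
    pvBeats freq m n = pvLexB (fun x => -(freq.getD x 0)) m n := by
  rw [Bool.eq_iff_iff]
  simp only [pvBeats, pvLexB, Bool.or_eq_true, Bool.and_eq_true, decide_eq_true_eq, beq_iff_eq]
  omega

theorem pv_rankB_getD (ex : List Int) (freq : PySem.Dict Int Int) {n : Int}
    (hn : n ∈ pvCandB ex) :
    (pvRankB ex freq).getD n 0
      = (((pvCandB ex).countP (fun m =>
          (PySem.Int.mod m 10 == PySem.Int.mod n 10) && pvBeats freq m n) : Nat) : Int) := by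
  unfold pvRankB
  rw [pv_getD_foldl_insert _ _ (pv_nodup_candB ex), if_pos hn]

-- rank[n] counts exactly the members of n's group that the canonical group order
-- places before n
theorem pv_rank_eq (ex : List Int) (freq : PySem.Dict Int Int) {n : Int}
    (hn : n ∈ pvCandB ex) :
    (pvRankB ex freq).getD n 0
      = (((pvG ex freq (PySem.Int.mod n 10)).countP
            (fun m => pvLexB (fun x => -(freq.getD x 0)) m n) : Nat) : Int) := by
  rw [pv_rankB_getD ex freq hn]
  congr 1
  obtain ⟨h1, h2, h3⟩ := pv_mem_candB.1 hn
  have h0 : 0 ≤ PySem.Int.mod n 10 := PySem.Int.mod_nonneg n (by norm_num)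
  have h10 : PySem.Int.mod n 10 < 10 := PySem.Int.mod_lt n (by norm_num)
  calc (pvCandB ex).countP (fun m => (PySem.Int.mod m 10 == PySem.Int.mod n 10) && pvBeats freq m n)
      = (pvCandB ex).countP (fun m => pvBeats freq m n && (PySem.Int.mod m 10 == PySem.Int.mod n 10)) := by
        apply List.countP_congr; intro m _; rw [Bool.and_comm]
    _ = ((pvCandB ex).filter (fun m => PySem.Int.mod m 10 == PySem.Int.mod n 10)).countP
          (fun m => pvBeats freq m n) := by rw [List.countP_filter]
    _ = (pvCand ex (PySem.Int.mod n 10)).countP (fun m => pvBeats freq m n) := by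
        rw [pv_filter_candB ex _ h0 h10]
    _ = (pvG ex freq (PySem.Int.mod n 10)).countP (fun m => pvBeats freq m n) := by
        exact (List.Perm.countP_eq _ (PySem.List.sorted_perm _ _ _)).symm
    _ = (pvG ex freq (PySem.Int.mod n 10)).countP
          (fun m => pvLexB (fun x => -(freq.getD x 0)) m n) := by
        apply List.countP_congr; intro m _; rw [pv_beats_lex]

-- the composite key of the element at round rn of tail t
theorem pv_keyB_elem (ex : List Int) (freq : PySem.Dict Int Int) {t : Int}
    (ht : t ∈ pvTails ex freq) {rn : Nat} (hrn : rn < (pvG ex freq t).length) :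
    (pvRankB ex freq).getD ((pvG ex freq t)[rn]) 0 * 10
      + (pvTrankB ex freq).getD (PySem.Int.mod ((pvG ex freq t)[rn]) 10) 0
    = (rn : Int) * 10
      + (((pvTails ex freq).countP (fun u =>
          pvLexB (fun u => -(freq.getD (PySem.List.pyGetD (pvG ex freq u) 0 0) 0)) u t) : Nat) : Int) := by
  obtain ⟨h0, h10, _⟩ := pv_mem_avail.1 (pv_mem_tails_iff.1 ht)
  have hx : (pvG ex freq t)[rn] ∈ pvG ex freq t := List.getElem_mem hrn
  obtain ⟨g1, g2, g3, g4⟩ := pv_mem_cand h0 h10 (pv_mem_pvG.1 hx)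
  have hmod : PySem.Int.mod ((pvG ex freq t)[rn]) 10 = t := by
    rw [pv_mod_eq_emod]; exact g3
  have hcB : (pvG ex freq t)[rn] ∈ pvCandB ex := pv_mem_candB.2 ⟨g1, g2, g4⟩
  rw [hmod, pv_trank_eq ex freq ht, pv_rank_eq ex freq hcB, hmod,
    pv_countP_index _ _ (pv_pairwise_pvG ex freq t h0 h10) rn hrn]

-- membership in a round-robin row
theorem pv_mem_row {ex : List Int} {freq : PySem.Dict Int Int} {r x : Int}
    (hx : x ∈ pvRowG (pvG ex freq) (pvTails ex freq) r) (hr : 0 ≤ r) :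
    ∃ t ∈ pvTails ex freq, ∃ hrn : r.toNat < (pvG ex freq t).length,
      x = (pvG ex freq t)[r.toNat] := by
  unfold pvRowG at hx
  simp only [List.mem_map, List.mem_filter] at hx
  obtain ⟨t, ⟨htl, hlen⟩, hval⟩ := hx
  simp only [decide_eq_true_eq, PySem.List.len_eq] at hlen
  have hrn : r.toNat < (pvG ex freq t).length := by omega
  refine ⟨t, htl, hrn, ?_⟩
  rw [← hval]
  conv_lhs => rw [show r = ((r.toNat : Nat) : Int) from by omega]
  rw [PySem.List.pyGetD_natCast, List.getD_eq_getElem _ _ hrn]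

set_option maxHeartbeats 1000000 in
theorem pv_order_pairwise (ex : List Int) (freq : PySem.Dict Int Int) :
    (pvOrder ex freq).Pairwise (fun a b =>
      (pvRankB ex freq).getD a 0 * 10 + (pvTrankB ex freq).getD (PySem.Int.mod a 10) 0
        < (pvRankB ex freq).getD b 0 * 10 + (pvTrankB ex freq).getD (PySem.Int.mod b 10) 0) := by
  have hTlen : (pvTails ex freq).length ≤ 10 := by
    unfold pvTails
    rw [PySem.List.length_sorted]
    unfold pvAvail
    exact le_trans (List.length_filter_le _ _) (by decide)
  have htr_lt : ∀ t ∈ pvTails ex freq,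
      (pvTails ex freq).countP (fun u =>
        pvLexB (fun u => -(freq.getD (PySem.List.pyGetD (pvG ex freq u) 0 0) 0)) u t)
        < (pvTails ex freq).length :=
    fun t ht => pv_countP_lt_length _ (pv_pairwise_tails ex freq) ht
  unfold pvOrder pvOrdFrom
  rw [List.flatMap_def, List.pairwise_flatten]
  refine ⟨?_, ?_⟩
  · -- each row is strictly increasing in the composite key (tail order strictly increases)
    intro row hrow
    rw [List.mem_map] at hrow
    obtain ⟨r, hr, rfl⟩ := hrow
    have hr0 : 0 ≤ r := ((PySem.List.mem_pyRange_one).1 hr).1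
    unfold pvRowG
    rw [List.pairwise_map]
    have hpwf : ((pvTails ex freq).filter (fun t => r < PySem.List.len (pvG ex freq t))).Pairwise
        (fun a b => pvLexB (fun u => -(freq.getD (PySem.List.pyGetD (pvG ex freq u) 0 0) 0)) a b = true) :=
      List.Pairwise.filter _ (pv_pairwise_tails ex freq)
    refine List.Pairwise.imp_of_mem ?_ hpwf
    intro t t' htm htm' hlex
    have htT : t ∈ pvTails ex freq := (List.mem_filter.1 htm).1
    have htT' : t' ∈ pvTails ex freq := (List.mem_filter.1 htm').1
    have hlt : r < PySem.List.len (pvG ex freq t) := by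
      have := (List.mem_filter.1 htm).2; simpa using this
    have hlt' : r < PySem.List.len (pvG ex freq t') := by
      have := (List.mem_filter.1 htm').2; simpa using this
    rw [PySem.List.len_eq] at hlt hlt'
    have hrn : r.toNat < (pvG ex freq t).length := by omega
    have hrn' : r.toNat < (pvG ex freq t').length := by omega
    have hre : r = (r.toNat : Int) := by omega
    rw [hre, PySem.List.pyGetD_natCast, PySem.List.pyGetD_natCast,
      List.getD_eq_getElem _ _ hrn, List.getD_eq_getElem _ _ hrn',
      pv_keyB_elem ex freq htT hrn, pv_keyB_elem ex freq htT' hrn']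
    have := pv_countP_lt _ (pv_pairwise_tails ex freq) htT htT' hlex
    omega
  · -- later rounds have strictly larger keys than earlier rounds
    rw [List.pairwise_map]
    refine List.Pairwise.imp_of_mem ?_
      (pv_pairwise_pyRange_one (pvRounds ex freq - 0).toNat 0 (pvRounds ex freq) le_rfl)
    intro r r' hrm hrm' hrr x hx y hy
    have hr0 : 0 ≤ r := ((PySem.List.mem_pyRange_one).1 hrm).1
    have hr0' : 0 ≤ r' := ((PySem.List.mem_pyRange_one).1 hrm').1
    obtain ⟨t, htT, hrn, rfl⟩ := pv_mem_row hx hr0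
    obtain ⟨t', htT', hrn', rfl⟩ := pv_mem_row hy hr0'
    rw [pv_keyB_elem ex freq htT hrn, pv_keyB_elem ex freq htT' hrn']
    have h1 := htr_lt t htT
    have h2 := htr_lt t' htT'
    have : r.toNat < r'.toNat := by omega
    omega

theorem pv_order_mem (ex : List Int) (freq : PySem.Dict Int Int) {n : Int} :
    n ∈ pvOrder ex freq ↔ n ∈ pvCandB ex := by
  constructor
  · intro hn
    unfold pvOrder pvOrdFrom at hn
    rw [List.mem_flatMap] at hn
    obtain ⟨r, hr, hrow⟩ := hn
    have hr0 : 0 ≤ r := ((PySem.List.mem_pyRange_one).1 hr).1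
    obtain ⟨t, htT, hrn, rfl⟩ := pv_mem_row hrow hr0
    obtain ⟨h0, h10, _⟩ := pv_mem_avail.1 (pv_mem_tails_iff.1 htT)
    obtain ⟨g1, g2, g3, g4⟩ := pv_mem_cand h0 h10 (pv_mem_pvG.1 (List.getElem_mem hrn))
    exact pv_mem_candB.2 ⟨g1, g2, g4⟩
  · intro hn
    obtain ⟨h1, h2, h3⟩ := pv_mem_candB.1 hn
    exact pv_mem_order ex freq h1 h2 h3

theorem pv_order_nodup (ex : List Int) (freq : PySem.Dict Int Int) :
    (pvOrder ex freq).Nodup :=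
  (pv_order_pairwise ex freq).imp (fun h he => by subst he; exact lt_irrefl _ h)

theorem pv_order_perm (ex : List Int) (freq : PySem.Dict Int Int) :
    (pvOrder ex freq).Perm (pvCandB ex) := by
  rw [List.perm_ext_iff_of_nodup (pv_order_nodup ex freq) (pv_nodup_candB ex)]
  intro n
  exact pv_order_mem ex freq

-- B's single sort on the composite key reproduces the round-robin order exactly
theorem pv_sorted_candB_key (ex : List Int) (freq : PySem.Dict Int Int) :
    PySem.List.sorted (pvCandB ex)
      (fun n => (pvRankB ex freq).getD n 0 * 10 + (pvTrankB ex freq).getD (PySem.Int.mod n 10) 0) false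
      = pvOrder ex freq :=
  PySem.List.sorted_eq_of_perm_of_pairwise_lt _ _ _ (pv_order_perm ex freq) (pv_order_pairwise ex freq)

theorem pv_selectB_eq (ex : List Int) (freq : PySem.Dict Int Int) :
    pvSelectB ex freq
      = PySem.List.sorted (PySem.List.slice (pvOrder ex freq) none (some 6)) (fun n => n) false := by
  unfold pvSelectB
  dsimp only
  rw [pv_sorted_candB_key]

-- ===== VERDICT (by name: the statement is the Claim_ definition above) =====
theorem tail_balance_bet_biglotto_spec : Claim_equal_tail_balance_bet_biglotto := by
  intro history window exclude _ _
  unfold Spec_tail_balance_bet_biglotto tail_balance_bet_biglotto tail_balance_bet_biglotto_alt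
  rw [pv_selectA_eq, pv_selectB_eq]
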